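-- pv_equiv track=rewrite | github.com/nlavidas/historical-linguistics-platform | scripts/ml_tools.py | vocabulary_growth
-- ===== SOURCE A (Python) =====
-- from typing import Dict, List, Optional, Tuple, Any
--
-- def vocabulary_growth(tokens: List[str], step: int = 1000) -> List[Tuple[int, int]]:
--     """Track vocabulary growth over token count"""
--     growth = []
--     seen = set()
--
--     for i, token in enumerate(tokens):
--         seen.add(token)
--         if (i + 1) % step == 0:
--             growth.append((i + 1, len(seen)))
--
--     return growth
-- ===== SOURCE B (Python) =====
-- def vocabulary_growth(tokens, step=1000):
--     """Track vocabulary growth over token count (block-wise re-implementation)."""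
--     if not tokens:
--         return []
--     s = abs(step)
--     m = len(tokens) // s
--     growth = []
--     seen = set()
--     for k in range(1, m + 1):
--         seen.update(tokens[(k - 1) * s : k * s])
--         growth.append((k * s, len(seen)))
--     return growth
-- ===== Notes on version B (the rewrite author's own statement) =====
-- stated objective: alternative
-- what changed: Replaces the per-token enumerate loop with its per-token modulo test by a block-wise loop: compute the number of complete steps m = len(tokens)//|step| and do one bulk set.update per step-block slice, recording (block boundary, vocabulary size) once per block.
import Mathlib
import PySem

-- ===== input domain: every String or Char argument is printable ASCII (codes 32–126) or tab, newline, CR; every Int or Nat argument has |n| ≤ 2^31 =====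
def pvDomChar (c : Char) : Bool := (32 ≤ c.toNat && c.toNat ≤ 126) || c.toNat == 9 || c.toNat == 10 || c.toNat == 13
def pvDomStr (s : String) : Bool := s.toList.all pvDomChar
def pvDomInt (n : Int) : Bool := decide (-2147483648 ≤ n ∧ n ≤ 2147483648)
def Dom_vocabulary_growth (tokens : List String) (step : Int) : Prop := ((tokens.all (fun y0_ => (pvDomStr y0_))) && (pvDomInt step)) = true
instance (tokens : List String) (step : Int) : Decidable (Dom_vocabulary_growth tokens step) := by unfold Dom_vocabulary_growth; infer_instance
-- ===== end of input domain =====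

-- B replaces the per-token modulo test by a block-wise loop over complete step-blocks (same cost, different decomposition).

-- ===== PORT A =====
def vocabulary_growth (tokens : List String) (step : Int) : List (Int × Int) :=
  (((PySem.List.enumerate tokens 0).foldl
      (fun (st : List (Int × Int) × PySem.Set String) (p : Int × String) =>
        let seen := PySem.Set.add st.2 p.2
        (if PySem.Int.mod (p.1 + 1) step = 0
         then st.1 ++ [(p.1 + 1, (PySem.Set.len seen : Int))]
         else st.1, seen))
      ([], PySem.Set.empty))).1

-- ===== PORT B =====
def vocabulary_growth_alt (tokens : List String) (step : Int) : List (Int × Int) :=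
  if tokens = [] then []
  else
    let s : Int := |step|
    let m : Int := PySem.Int.floordiv (tokens.length : Int) s
    (((PySem.List.pyRange 1 (m + 1) 1).foldl
        (fun (st : List (Int × Int) × PySem.Set String) (k : Int) =>
          let seen := PySem.Set.update st.2 (PySem.List.slice tokens (some ((k - 1) * s)) (some (k * s)))
          (st.1 ++ [(k * s, (PySem.Set.len seen : Int))], seen))
        ([], PySem.Set.empty))).1

-- ===== PRECONDITION & SPEC =====
-- Pre_ excludes exactly the inputs where Python A raises ZeroDivisionError: step = 0 with a nonempty token list.
def Pre_vocabulary_growth (tokens : List String) (step : Int) : Prop := tokens = [] ∨ step ≠ 0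
instance (tokens : List String) (step : Int) : Decidable (Pre_vocabulary_growth tokens step) := by unfold Pre_vocabulary_growth; infer_instance
def pvWitness_vocabulary_growth : List String × Int := (["a", "b", "a", "c"], 2)

def Spec_vocabulary_growth (tokens : List String) (step : Int) (out : List (Int × Int)) : Prop := out = vocabulary_growth_alt tokens step
instance (tokens : List String) (step : Int) (out : List (Int × Int)) : Decidable (Spec_vocabulary_growth tokens step out) := by unfold Spec_vocabulary_growth; infer_instance

-- ===== CLAIM (what is proved, stated in full; the proofs are below) =====
def Claim_equal_vocabulary_growth : Prop := ∀ (tokens : List String) (step : Int), Dom_vocabulary_growth tokens step → Pre_vocabulary_growth tokens step → Spec_vocabulary_growth tokens step (vocabulary_growth tokens step)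

-- ===== LEMMAS AND PROOFS =====

-- the vocabulary-size checkpoint at token count j of the full token list T
def pvChk (T : List String) (j : Nat) : Int × Int :=
  ((j : Int), (PySem.Set.len (PySem.Set.ofList (T.take j)) : Int))

lemma set_ofList_append_singleton (pre : List String) (x : String) :
    PySem.Set.ofList (pre ++ [x]) = PySem.Set.add (PySem.Set.ofList pre) x := by
  simp [PySem.Set.ofList_eq_foldl, List.foldl_append]

lemma set_ofList_append (pre suf : List String) :
    PySem.Set.ofList (pre ++ suf) = PySem.Set.update (PySem.Set.ofList pre) suf := by
  simp [PySem.Set.ofList_eq_foldl, PySem.Set.update, List.foldl_append]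

-- A-side invariant: folding the rest of the enumeration appends the checkpoints at
-- step-divisible positions beyond the consumed prefix.
lemma A_inv (step : Int) (suf : List String) : ∀ (pre : List String) (g : List (Int × Int)),
    ((PySem.List.enumerate suf (pre.length : Int)).foldl
      (fun (st : List (Int × Int) × PySem.Set String) (p : Int × String) =>
        let seen := PySem.Set.add st.2 p.2
        (if PySem.Int.mod (p.1 + 1) step = 0
         then st.1 ++ [(p.1 + 1, (PySem.Set.len seen : Int))]
         else st.1, seen))
      (g, PySem.Set.ofList pre)).1
    = g ++ ((List.range' (pre.length + 1) suf.length).filter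
              (fun (j : Nat) => decide (step ∣ (j : Int)))).map (pvChk (pre ++ suf)) := by
  induction suf with
  | nil => intro pre g; simp [PySem.List.enumerate_nil]
  | cons x suf ih =>
    intro pre g
    rw [PySem.List.enumerate_cons]
    simp only [List.foldl_cons]
    have hadd : PySem.Set.add (PySem.Set.ofList pre) x = PySem.Set.ofList (pre ++ [x]) :=
      (set_ofList_append_singleton pre x).symm
    have hlen : ((pre ++ [x]).length : Int) = (pre.length : Int) + 1 := by simp
    have hassoc : (pre ++ [x]) ++ suf = pre ++ x :: suf := by simp
    have hdvd : (PySem.Int.mod ((pre.length : Int) + 1) step = 0) ↔ step ∣ ((pre.length + 1 : Nat) : Int) := by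
      rw [PySem.Int.mod_eq_zero_iff_dvd]; push_cast; ring_nf
    have hrange : List.range' (pre.length + 1) (x :: suf).length
        = (pre.length + 1) :: List.range' (pre.length + 1 + 1) suf.length := by
      simp [List.range'_succ]
    have htake : (pre ++ x :: suf).take (pre.length + 1) = pre ++ [x] := by
      have h0 : pre ++ x :: suf = (pre ++ [x]) ++ suf := by simp
      rw [h0]
      have h1 : pre.length + 1 = (pre ++ [x]).length := by simp
      rw [h1, List.take_left]
    have hlenN : (pre ++ [x]).length = pre.length + 1 := by simp
    by_cases hc : PySem.Int.mod ((pre.length : Int) + 1) step = 0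
    · simp only [hc, if_true, hadd]
      have hih := ih (pre ++ [x]) (g ++ [((pre.length : Int) + 1, (PySem.Set.len (PySem.Set.ofList (pre ++ [x])) : Int))])
      rw [hlen, hlenN, hassoc] at hih
      rw [hih, hrange]
      have hd : step ∣ ((pre.length + 1 : Nat) : Int) := hdvd.mp hc
      have hhead : pvChk (pre ++ x :: suf) (pre.length + 1)
          = ((pre.length : Int) + 1, (PySem.Set.len (PySem.Set.ofList (pre ++ [x])) : Int)) := by
        simp [pvChk, htake]
      have hdInt : step ∣ ((pre.length : Int) + 1) := by push_cast at hd; exact hd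
      simp [hdInt, hhead]
    · simp only [hc, if_false, hadd]
      have hih := ih (pre ++ [x]) g
      rw [hlen, hlenN, hassoc] at hih
      rw [hih, hrange]
      have hd : ¬ step ∣ ((pre.length + 1 : Nat) : Int) := fun hh => hc (hdvd.mpr hh)
      have hd' : ¬ step ∣ ((pre.length : Int) + 1) := by push_cast at hd; exact hd
      simp [hd']

-- the step-divisible positions in [1, n] are exactly the multiples s, 2s, …, (n/s)*s
lemma mults_eq (s : Nat) (n : Nat) :
    (List.range' 1 n).filter (fun (j : Nat) => decide (s ∣ j))
      = (List.range (n / s)).map (fun k => (k + 1) * s) := by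
  induction n with
  | zero =>
    have : 0 / s = 0 := Nat.zero_div s
    simp [this]
  | succ n ih =>
    rw [List.range'_concat, List.filter_append, ih]
    simp only [Nat.one_mul, List.filter_cons, List.filter_nil]
    by_cases hd : s ∣ (n + 1)
    · have hdiv : (n + 1) / s = n / s + if s ∣ n + 1 then 1 else 0 := Nat.succ_div
      simp only [hd, if_true] at hdiv
      have hlast : (n / s + 1) * s = n + 1 := by
        have h1 : (n + 1) / s * s = n + 1 := Nat.div_mul_cancel hd
        rw [hdiv] at h1; exact h1
      rw [hdiv, List.range_succ, List.map_append]
      have h1n : 1 + n = n + 1 := Nat.add_comm 1 n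
      simp [h1n, hd, hlast]
    · have hdiv : (n + 1) / s = n / s + if s ∣ n + 1 then 1 else 0 := Nat.succ_div
      simp only [hd, if_false] at hdiv
      rw [hdiv]
      have h1n : 1 + n = n + 1 := Nat.add_comm 1 n
      simp [h1n, hd]

-- B-side invariant: after j blocks, growth holds the first j checkpoints and seen the first j*s tokens.
lemma B_inv (T : List String) (s : Nat) (j : Nat) :
    ((List.range j).foldl
      (fun (st : List (Int × Int) × PySem.Set String) (q : Nat) =>
        (st.1 ++ [((1 + (q : Int)) * (s : Int),
            (PySem.Set.len (PySem.Set.update st.2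
              (PySem.List.slice T (some ((1 + (q : Int) - 1) * (s : Int))) (some ((1 + (q : Int)) * (s : Int))))) : Int))],
          PySem.Set.update st.2
            (PySem.List.slice T (some ((1 + (q : Int) - 1) * (s : Int))) (some ((1 + (q : Int)) * (s : Int))))))
      ([], PySem.Set.empty))
    = ((List.range j).map (fun k => pvChk T ((k + 1) * s)), PySem.Set.ofList (T.take (j * s))) := by
  induction j with
  | zero => simp [PySem.Set.ofList, PySem.Set.empty]
  | succ j ih =>
    rw [List.range_succ, List.foldl_append, ih, List.map_append]
    simp only [List.foldl_cons, List.foldl_nil]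
    have h1 : (1 + (j : Int) - 1) * (s : Int) = ((j * s : Nat) : Int) := by push_cast; ring
    have h2 : (1 + (j : Int)) * (s : Int) = (((j + 1) * s : Nat) : Int) := by push_cast; ring
    have hslice : PySem.List.slice T (some ((j * s : Nat) : Int)) (some (((j + 1) * s : Nat) : Int))
        = (T.drop (j * s)).take ((j + 1) * s - j * s) := PySem.List.slice_natCast T _ _
    have hmul : (j + 1) * s = j * s + s := by ring
    have hsub : (j + 1) * s - j * s = s := by omega
    have hupd : PySem.Set.update (PySem.Set.ofList (T.take (j * s))) ((T.drop (j * s)).take s)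
        = PySem.Set.ofList (T.take ((j + 1) * s)) := by
      rw [← set_ofList_append, ← List.take_add]
      congr 1
      rw [hmul]
    rw [h1, h2, hslice, hsub, hupd]
    simp [pvChk]

-- ===== VERDICT (by name: the statement is the Claim_ definition above) =====
theorem vocabulary_growth_spec : Claim_equal_vocabulary_growth := by
  intro tokens step _ hpre
  unfold Spec_vocabulary_growth
  rcases hpre with h | h
  · subst h
    simp [vocabulary_growth, vocabulary_growth_alt, PySem.List.enumerate_nil]
  · by_cases hnil : tokens = []
    · subst hnil
      simp [vocabulary_growth, vocabulary_growth_alt, PySem.List.enumerate_nil]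
    · set s : Nat := step.natAbs with hs
      have hAbs : |step| = (s : Int) := by rw [hs]; exact (Int.abs_eq_natAbs step)
      -- A side: the fold equals the checkpoints at step-divisible positions
      have hA : vocabulary_growth tokens step
          = ((List.range' 1 tokens.length).filter (fun (j : Nat) => decide (step ∣ (j : Int)))).map (pvChk tokens) := by
        unfold vocabulary_growth
        have hinv := A_inv step tokens [] []
        simpa using hinv
      -- step-divisibility over Int matches |step|-divisibility over Nat
      have hfilter : (List.range' 1 tokens.length).filter (fun (j : Nat) => decide (step ∣ (j : Int)))
          = (List.range' 1 tokens.length).filter (fun (j : Nat) => decide (s ∣ j)) := by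
        apply List.filter_congr
        intro j _
        simp only [decide_eq_decide]
        rw [← Int.natAbs_dvd, ← hs]
        exact_mod_cast Iff.rfl
      -- B side: the block loop equals the checkpoints at the multiples of s
      have hB : vocabulary_growth_alt tokens step
          = (List.range (tokens.length / s)).map (fun k => pvChk tokens ((k + 1) * s)) := by
        unfold vocabulary_growth_alt
        rw [if_neg hnil]
        simp only [hAbs]
        have hm : PySem.Int.floordiv (tokens.length : Int) (s : Int)
            = ((tokens.length / s : Nat) : Int) := PySem.Int.floordiv_natCast _ _
        rw [hm]
        have hrange : PySem.List.pyRange 1 (((tokens.length / s : Nat) : Int) + 1) 1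
            = (List.range (tokens.length / s)).map (fun (k : Nat) => 1 + (k : Int)) := by
          have he : ((tokens.length / s : Nat) : Int) + 1 - 1 = ((tokens.length / s : Nat) : Int) := by ring
          rw [PySem.List.pyRange_one, he, Int.toNat_natCast]
        rw [hrange, List.foldl_map]
        have hinv := B_inv tokens s (tokens.length / s)
        exact congrArg Prod.fst hinv
      rw [hA, hfilter, mults_eq s, List.map_map, hB]
      rfl
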